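-- pv_equiv track=rewrite | github.com/electron/electron | script/lib/git.py | remove_patch_filename
-- ===== SOURCE A (Python) =====
-- def remove_patch_filename(patch):
--   """Strip out the Patch-Filename trailer from a patch's message body"""
--   force_keep_next_line = False
--   for i, l in enumerate(patch):
--     is_patchfilename = l.startswith('Patch-Filename: ')
--     next_is_patchfilename = i < len(patch) - 1 and patch[i + 1].startswith(
--       'Patch-Filename: '
--     )
--     if not force_keep_next_line and (
--       is_patchfilename or (next_is_patchfilename and len(l.rstrip()) == 0)
--     ):
--       pass  # drop this line
--     else:
--       yield l
--     force_keep_next_line = l.startswith('Subject: ')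
-- ===== SOURCE B (Python) =====
-- def remove_patch_filename(patch):
--   """Strip out the Patch-Filename trailer from a patch's message body"""
--   have_prev = False
--   prev = None
--   force_keep = False
--   for l in patch:
--     if have_prev:
--       drop = not force_keep and (
--         prev.startswith('Patch-Filename: ')
--         or (l.startswith('Patch-Filename: ') and len(prev.rstrip()) == 0)
--       )
--       if not drop:
--         yield prev
--       force_keep = prev.startswith('Subject: ')
--     prev = l
--     have_prev = True
--   if have_prev:
--     if force_keep or not prev.startswith('Patch-Filename: '):
--       yield prev
-- ===== Notes on version B (the rewrite author's own statement) =====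
-- stated objective: alternative
-- what changed: Replaces the enumerate-with-lookahead loop (peeking at patch[i+1] by index) with a single streaming pass that buffers one line and emits it delayed, using the current line as the successor; the final buffered line is flushed with only the Patch-Filename test.
import Mathlib
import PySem

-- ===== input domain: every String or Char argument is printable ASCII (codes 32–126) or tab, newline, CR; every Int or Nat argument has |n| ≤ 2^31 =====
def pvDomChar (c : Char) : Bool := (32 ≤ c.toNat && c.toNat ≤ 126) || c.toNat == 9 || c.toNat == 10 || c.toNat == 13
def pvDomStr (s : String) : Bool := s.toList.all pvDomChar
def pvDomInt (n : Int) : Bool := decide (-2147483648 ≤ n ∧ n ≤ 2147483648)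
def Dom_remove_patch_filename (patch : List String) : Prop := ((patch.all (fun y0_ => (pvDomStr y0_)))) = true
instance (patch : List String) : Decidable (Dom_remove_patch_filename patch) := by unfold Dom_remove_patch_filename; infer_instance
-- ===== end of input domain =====

-- B differs from A by decomposition: delayed one-line buffer instead of index lookahead. Same output.

-- ===== PORT A =====
-- A iterates with enumerate and peeks at patch[i+1]; ported as index recursion.
def removeLoopA (patch : List String) (i : Nat) (force_keep_next_line : Bool) : List String :=
  if h : i < patch.length then
    let l := patch[i]
    let is_patchfilename := PySem.Str.startswith l "Patch-Filename: "
    let next_is_patchfilename :=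
      decide (i < patch.length - 1) &&
        PySem.Str.startswith (patch.getD (i + 1) "") "Patch-Filename: "
    let emitted :=
      if !force_keep_next_line &&
          (is_patchfilename ||
            (next_is_patchfilename && (PySem.Str.len (PySem.Str.rstrip l) == 0)))
      then ([] : List String)
      else [l]
    emitted ++ removeLoopA patch (i + 1) (PySem.Str.startswith l "Subject: ")
  else []
termination_by patch.length - i

def remove_patch_filename (patch : List String) : List String :=
  removeLoopA patch 0 false

-- ===== PORT B =====
-- B buffers the previous line and decides on it when the next line arrives.
def removeLoopB (prev : String) (force_keep : Bool) : List String → List String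
  | [] =>
      if force_keep || !PySem.Str.startswith prev "Patch-Filename: " then [prev] else []
  | l :: rest =>
      let drop := !force_keep &&
        (PySem.Str.startswith prev "Patch-Filename: " ||
          (PySem.Str.startswith l "Patch-Filename: " &&
            (PySem.Str.len (PySem.Str.rstrip prev) == 0)))
      (if drop then ([] : List String) else [prev]) ++
        removeLoopB l (PySem.Str.startswith prev "Subject: ") rest

def remove_patch_filename_alt (patch : List String) : List String :=
  match patch with
  | [] => []
  | l :: rest => removeLoopB l false rest

-- ===== PRECONDITION & SPEC =====
def Spec_remove_patch_filename (patch : List String) (out : List String) : Prop := out = remove_patch_filename_alt patch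
instance (patch : List String) (out : List String) : Decidable (Spec_remove_patch_filename patch out) := by unfold Spec_remove_patch_filename; infer_instance

-- ===== CLAIM (what is proved, stated in full; the proofs are below) =====
def Claim_equal_remove_patch_filename : Prop := ∀ (patch : List String), Dom_remove_patch_filename patch → Spec_remove_patch_filename patch (remove_patch_filename patch)

-- ===== LEMMAS AND PROOFS =====

-- A's index loop, rephrased structurally on the suffix patch.drop i.
def removeListA (fk : Bool) : List String → List String
  | [] => []
  | l :: rest =>
      let is_pf := PySem.Str.startswith l "Patch-Filename: "
      let next_pf := match rest with
        | [] => false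
        | n :: _ => PySem.Str.startswith n "Patch-Filename: "
      (if !fk && (is_pf || (next_pf && (PySem.Str.len (PySem.Str.rstrip l) == 0)))
        then ([] : List String) else [l]) ++
        removeListA (PySem.Str.startswith l "Subject: ") rest

theorem removeLoopA_eq_removeListA (patch : List String) (i : Nat) (fk : Bool) :
    removeLoopA patch i fk = removeListA fk (patch.drop i) := by
  by_cases h : i < patch.length
  · rw [removeLoopA]
    simp only [h, dif_pos]
    have hdrop : patch.drop i = patch[i] :: patch.drop (i + 1) :=
      List.drop_eq_getElem_cons h
    rw [hdrop]; simp only [removeListA]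
    have hnext : (match patch.drop (i + 1) with
        | [] => false
        | n :: _ => PySem.Str.startswith n "Patch-Filename: ") =
        (decide (i < patch.length - 1) &&
          PySem.Str.startswith (patch.getD (i + 1) "") "Patch-Filename: ") := by
      rcases hr : patch.drop (i + 1) with _ | ⟨n, rest⟩
      · have : patch.length ≤ i + 1 := by
          by_contra hc
          push Not at hc
          have := List.drop_eq_getElem_cons hc
          rw [hr] at this; exact List.cons_ne_nil _ _ this.symm
        have : ¬ i < patch.length - 1 := by omega
        simp [this]
      · have hi1 : i + 1 < patch.length := by
          by_contra hc
          push Not at hc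
          rw [List.drop_eq_nil_of_le hc] at hr
          exact List.cons_ne_nil _ _ hr.symm
        have hc := List.drop_eq_getElem_cons hi1
        rw [hr] at hc
        injection hc with h1 _
        have hlt : i < patch.length - 1 := by omega
        simp [hlt, List.getD, List.getElem?_eq_getElem hi1, ← h1]
    rw [removeLoopA_eq_removeListA patch (i + 1) (PySem.Str.startswith patch[i] "Subject: ")]
    rw [hnext]
  · rw [removeLoopA]
    simp only [h, dif_neg, not_false_iff]
    rw [List.drop_eq_nil_of_le (by omega), removeListA]
termination_by patch.length - i

theorem removeListA_eq_removeLoopB (rest : List String) (prev : String) (fk : Bool) :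
    removeListA fk (prev :: rest) = removeLoopB prev fk rest := by
  induction rest generalizing prev fk with
  | nil =>
      rw [removeListA, removeLoopB, removeListA]
      rcases fk <;>
        rcases PySem.Str.startswith prev "Patch-Filename: " <;> simp
  | cons l rest ih =>
      rw [removeListA, removeLoopB]
      rw [ih l (PySem.Str.startswith prev "Subject: ")]

-- ===== VERDICT (by name: the statement is the Claim_ definition above) =====
theorem remove_patch_filename_spec : Claim_equal_remove_patch_filename := by
  intro patch _
  unfold Spec_remove_patch_filename remove_patch_filename remove_patch_filename_alt
  rw [removeLoopA_eq_removeListA]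
  cases patch with
  | nil => rw [List.drop_nil, removeListA]
  | cons l rest => rw [List.drop_zero]; exact removeListA_eq_removeLoopB rest l false
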